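-- pv_equiv track=rewrite | github.com/jhsseonn/Programmers | 코테 입문 캘린더 - Programmers/Day 24/ChickenCoupon.py | solution
-- ===== SOURCE A (Python) =====
-- def solution(chicken):
--     answer = 0
--     rest_coupon = 0
--
--     if chicken<10:
--         answer+=chicken
--
--     while(chicken>=10):
--         rest_coupon += chicken%10
--         chicken = chicken//10
--         answer += chicken
--
--     rest_coupon += chicken
--
--     while(rest_coupon>=10):
--         answer += rest_coupon//10
--         rest_coupon = rest_coupon%10 + rest_coupon//10
--
--     return answer
-- ===== SOURCE B (Python) =====
-- def solution(chicken):
--     if chicken < 10: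
--         return chicken
--     answer = 0
--     coupons = chicken
--     while coupons >= 10:
--         answer += coupons // 10
--         coupons = coupons // 10 + coupons % 10
--     return answer
-- ===== Notes on version B (the rewrite author's own statement) =====
-- stated objective: simpler
-- what changed: Replaced A's two separate loops with split answer/rest_coupon bookkeeping by a single greedy exchange loop over one coupon pile (coupons = coupons//10 + coupons%10), behind the same chicken<10 early return.
import Mathlib
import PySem

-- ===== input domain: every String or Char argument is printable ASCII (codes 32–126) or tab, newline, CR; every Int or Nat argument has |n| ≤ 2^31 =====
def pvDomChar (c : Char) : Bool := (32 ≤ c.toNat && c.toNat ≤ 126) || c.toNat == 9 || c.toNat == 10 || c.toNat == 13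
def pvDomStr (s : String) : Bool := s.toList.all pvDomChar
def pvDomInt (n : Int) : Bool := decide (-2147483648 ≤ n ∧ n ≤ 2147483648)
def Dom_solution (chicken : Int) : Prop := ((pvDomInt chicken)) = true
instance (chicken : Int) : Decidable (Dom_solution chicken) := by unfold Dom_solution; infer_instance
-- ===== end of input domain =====

-- B replaces A's two separate loops by one greedy exchange loop over a single coupon pile (simpler decomposition; same asymptotic cost); return values agree on every Int.

-- ===== PORT A =====
-- first while loop of A: state (answer, rest_coupon, chicken)
def solutionLoop1 (answer rest chicken : Int) : Int × Int × Int :=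
  if chicken ≥ 10 then
    solutionLoop1 (answer + PySem.Int.floordiv chicken 10)
      (rest + PySem.Int.mod chicken 10) (PySem.Int.floordiv chicken 10)
  else (answer, rest, chicken)
termination_by chicken.toNat
decreasing_by
  rw [PySem.Int.floordiv_eq_ediv_of_pos (by norm_num)]; omega

-- second while loop of A: state (answer, rest_coupon)
def solutionLoop2 (answer rest : Int) : Int :=
  if rest ≥ 10 then
    solutionLoop2 (answer + PySem.Int.floordiv rest 10)
      (PySem.Int.mod rest 10 + PySem.Int.floordiv rest 10)
  else answer
termination_by rest.toNat
decreasing_by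
  rw [PySem.Int.floordiv_eq_ediv_of_pos (by norm_num),
      PySem.Int.mod_eq_emod_of_pos (by norm_num)]; omega

def solution (chicken : Int) : Int :=
  let answer : Int := if chicken < 10 then chicken else 0
  let s := solutionLoop1 answer 0 chicken
  solutionLoop2 s.1 (s.2.1 + s.2.2)

-- ===== PORT B =====
-- B's single greedy loop: state (answer, coupons)
def solutionAltLoop (answer coupons : Int) : Int :=
  if coupons ≥ 10 then
    solutionAltLoop (answer + PySem.Int.floordiv coupons 10)
      (PySem.Int.floordiv coupons 10 + PySem.Int.mod coupons 10)
  else answer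
termination_by coupons.toNat
decreasing_by
  rw [PySem.Int.floordiv_eq_ediv_of_pos (by norm_num),
      PySem.Int.mod_eq_emod_of_pos (by norm_num)]; omega

def solution_alt (chicken : Int) : Int :=
  if chicken < 10 then chicken
  else solutionAltLoop 0 chicken

-- ===== PRECONDITION & SPEC =====
def Spec_solution (chicken : Int) (out : Int) : Prop := out = solution_alt chicken
instance (chicken : Int) (out : Int) : Decidable (Spec_solution chicken out) := by unfold Spec_solution; infer_instance

-- ===== CLAIM (what is proved, stated in full; the proofs are below) =====
def Claim_equal_solution : Prop := ∀ (chicken : Int), Dom_solution chicken → Spec_solution chicken (solution chicken)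

-- ===== LEMMAS AND PROOFS =====
theorem pv_fd10 (x : Int) : PySem.Int.floordiv x 10 = x / 10 :=
  PySem.Int.floordiv_eq_ediv_of_pos (by norm_num)

theorem pv_md10 (x : Int) : PySem.Int.mod x 10 = x % 10 :=
  PySem.Int.mod_eq_emod_of_pos (by norm_num)

-- both settling loops compute answer + (rest-1)/9 once rest ≥ 1
theorem loop2_closed (rest : Int) (h : 1 ≤ rest) (answer : Int) :
    solutionLoop2 answer rest = answer + (rest - 1) / 9 := by
  by_cases h10 : rest ≥ 10
  · rw [solutionLoop2, if_pos h10, pv_fd10, pv_md10]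
    rw [loop2_closed (rest % 10 + rest / 10) (by omega)]
    omega
  · rw [solutionLoop2, if_neg h10]
    omega
termination_by rest.toNat
decreasing_by omega

theorem loopAlt_closed (coupons : Int) (h : 1 ≤ coupons) (answer : Int) :
    solutionAltLoop answer coupons = answer + (coupons - 1) / 9 := by
  by_cases h10 : coupons ≥ 10
  · rw [solutionAltLoop, if_pos h10, pv_fd10, pv_md10]
    rw [loopAlt_closed (coupons / 10 + coupons % 10) (by omega)]
    omega
  · rw [solutionAltLoop, if_neg h10]
    omega
termination_by coupons.toNat
decreasing_by omega

-- A's first loop followed by the settle loop also computes answer + (rest+chicken-1)/9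
theorem loop1_then_loop2 (chicken : Int) (hc : 1 ≤ chicken) (answer rest : Int)
    (hr : 0 ≤ rest) :
    solutionLoop2 (solutionLoop1 answer rest chicken).1
      ((solutionLoop1 answer rest chicken).2.1 + (solutionLoop1 answer rest chicken).2.2)
      = answer + (rest + chicken - 1) / 9 := by
  by_cases h10 : chicken ≥ 10
  · rw [solutionLoop1, if_pos h10, pv_fd10, pv_md10]
    rw [loop1_then_loop2 (chicken / 10) (by omega) _ _ (by omega)]
    omega
  · rw [solutionLoop1, if_neg h10]
    rw [loop2_closed (rest + chicken) (by omega)]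
  termination_by chicken.toNat
  decreasing_by omega

-- ===== VERDICT (by name: the statement is the Claim_ definition above) =====
theorem solution_spec : Claim_equal_solution := by
  intro chicken _
  unfold Spec_solution solution solution_alt
  by_cases h : chicken < 10
  · simp only [if_pos h]
    rw [solutionLoop1, if_neg (by omega)]
    dsimp only
    rw [solutionLoop2, if_neg (by omega)]
  · simp only [if_neg h]
    rw [loop1_then_loop2 chicken (by omega) 0 0 (by omega),
        loopAlt_closed chicken (by omega) 0]
    ring_nf
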